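-- pv_equiv track=rewrite | github.com/kicheev/tic-tac-toe | tictactoe.py | add_borders
-- ===== SOURCE A (Python) =====
-- def matrix_to_line(matrix):
--     line = [j for i in matrix for j in i]
--     return line
--
-- def add_borders(matrix):
--     ud_borders = '-'
--     lr_borders = '|'
--
--     field_height = 5
--     field_lenght = 9
--     field = [[' ' for j in range(field_lenght)] for i in range(field_height)]
--
--     line = matrix_to_line(matrix)
--     line_index = 0
--
--     for i in range(field_height):
--         for j in range(field_lenght):
--             if i == 0 or i == field_height - 1:
--                 field[i][j] = ud_borders
--             elif j == 0 or j == field_lenght - 1: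
--                 field[i][j] = lr_borders
--             elif j % 2 == 0:
--                 field[i][j] = line[line_index]
--                 line_index += 1
--
--     return field
-- ===== SOURCE B (Python) =====
-- def add_borders(matrix):
--     line = [x for row in matrix for x in row]
--     field = [['-'] * 9]
--     idx = 0
--     for _ in range(3):
--         row = ['|'] + [' '] * 7 + ['|']
--         for j in (2, 4, 6):
--             row[j] = line[idx]
--             idx += 1
--         field.append(row)
--     field.append(['-'] * 9)
--     return field
-- ===== Notes on version B (the rewrite author's own statement) =====
-- stated objective: simpler
-- what changed: Builds the 5x9 grid row-by-row (border rows and interior rows constructed directly) and fills only the nine playable cells, instead of scanning all 45 cells with a per-cell branch chain.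
import Mathlib
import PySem

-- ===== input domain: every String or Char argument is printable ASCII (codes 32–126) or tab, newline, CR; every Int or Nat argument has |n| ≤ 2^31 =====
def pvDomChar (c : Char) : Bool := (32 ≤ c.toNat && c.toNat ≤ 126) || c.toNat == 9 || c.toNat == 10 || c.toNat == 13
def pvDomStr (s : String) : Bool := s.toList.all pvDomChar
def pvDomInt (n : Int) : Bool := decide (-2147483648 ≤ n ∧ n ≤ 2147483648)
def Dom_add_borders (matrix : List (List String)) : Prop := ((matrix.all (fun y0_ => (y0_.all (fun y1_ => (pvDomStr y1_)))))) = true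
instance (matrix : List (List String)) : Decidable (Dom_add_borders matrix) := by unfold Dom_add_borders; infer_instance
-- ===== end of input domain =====

-- B builds the grid row-by-row and fills only the nine playable cells, instead of A's
-- 45-cell scan with a per-cell branch chain (objective: simpler decomposition, same cost).

-- ===== PORT A =====
-- helper matrix_to_line: [j for i in matrix for j in i]
def matrix_to_line (matrix : List (List String)) : List String :=
  matrix.flatMap (fun i => i)

-- field[i][j] = v for the in-range nonnegative indices A uses (0 ≤ i < 5, 0 ≤ j < 9);
-- exact for those indices.
def pvSetCell (field : List (List String)) (i j : Int) (v : String) : List (List String) :=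
  field.modify i.toNat (fun row => row.set j.toNat v)

-- literal transliteration of A: 5x9 blank field, then the nested i/j loop with the branch
-- chain, threading (field, line_index). line[line_index] is pyGet?; Pre_ keeps it in range,
-- so the `.getD " "` default is never the returned value on admitted inputs.
def add_borders (matrix : List (List String)) : List (List String) :=
  let field : List (List String) :=
    (List.range 5).map (fun _ => (List.range 9).map (fun _ => " "))
  let line := matrix_to_line matrix
  let st :=
    (PySem.List.pyRange 0 5 1).foldl (fun st i =>
      (PySem.List.pyRange 0 9 1).foldl (fun (st : List (List String) × Int) j =>
        if i == 0 || i == 5 - 1 then (pvSetCell st.1 i j "-", st.2)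
        else if j == 0 || j == 9 - 1 then (pvSetCell st.1 i j "|", st.2)
        else if PySem.Int.mod j 2 == 0 then
          (pvSetCell st.1 i j ((PySem.List.pyGet? line st.2).getD " "), st.2 + 1)
        else st) st) (field, (0 : Int))
  st.1

-- ===== PORT B =====
-- literal transliteration of Source B: top row, three interior rows each freshly built and
-- filled at j ∈ {2,4,6} from line[idx], bottom row.
def add_borders_alt (matrix : List (List String)) : List (List String) :=
  let line := matrix.flatMap (fun row => row)
  let st :=
    (List.range 3).foldl (fun (st : List (List String) × Int) _ =>
      let row := ["|"] ++ List.replicate 7 " " ++ ["|"]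
      let rs := ([2, 4, 6] : List Nat).foldl (fun (rs : List String × Int) j =>
        (rs.1.set j ((PySem.List.pyGet? line rs.2).getD " "), rs.2 + 1)) (row, st.2)
      (st.1 ++ [rs.1], rs.2)) ([List.replicate 9 "-"], (0 : Int))
  st.1 ++ [List.replicate 9 "-"]

-- ===== PRECONDITION & SPEC =====
-- A (and B) raise IndexError reading line[line_index] when the flattened matrix has fewer
-- than 9 entries; Pre_ excludes exactly those inputs.
def Pre_add_borders (matrix : List (List String)) : Prop :=
  9 ≤ (matrix.flatMap (fun row => row)).length
instance (matrix : List (List String)) : Decidable (Pre_add_borders matrix) := by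
  unfold Pre_add_borders; infer_instance

def pvWitness_add_borders : List (List String) :=
  [["X", "O", " "], ["O", "X", " "], [" ", " ", "X"]]

def Spec_add_borders (matrix : List (List String)) (out : List (List String)) : Prop :=
  out = add_borders_alt matrix
instance (matrix : List (List String)) (out : List (List String)) :
    Decidable (Spec_add_borders matrix out) := by unfold Spec_add_borders; infer_instance

-- ===== CLAIM (what is proved, stated in full; the proofs are below) =====
def Claim_equal_add_borders : Prop :=
  ∀ (matrix : List (List String)), Dom_add_borders matrix → Pre_add_borders matrix →
    Spec_add_borders matrix (add_borders matrix)

-- ===== LEMMAS AND PROOFS =====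

-- Both ports, applied to a flattened line with at least nine entries, yield the same
-- explicit grid; with the first nine elements named, both sides reduce to it.
theorem pv_core (a b c d e f g h i : String) (rest : List String)
    (matrix : List (List String))
    (hline : matrix.flatMap (fun row => row) = a :: b :: c :: d :: e :: f :: g :: h :: i :: rest) :
    add_borders matrix = add_borders_alt matrix := by
  simp only [add_borders, add_borders_alt, matrix_to_line, hline]
  rfl

-- ===== VERDICT (by name: the statement is the Claim_ definition above) =====
theorem add_borders_spec : Claim_equal_add_borders := by
  intro matrix _ hpre
  unfold Spec_add_borders
  unfold Pre_add_borders at hpre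
  set ys := matrix.flatMap (fun row => row) with hys
  rcases ys with _ | ⟨a, ys⟩; · simp at hpre
  rcases ys with _ | ⟨b, ys⟩; · simp at hpre
  rcases ys with _ | ⟨c, ys⟩; · simp at hpre
  rcases ys with _ | ⟨d, ys⟩; · simp at hpre
  rcases ys with _ | ⟨e, ys⟩; · simp at hpre
  rcases ys with _ | ⟨f, ys⟩; · simp at hpre
  rcases ys with _ | ⟨g, ys⟩; · simp at hpre
  rcases ys with _ | ⟨h, ys⟩; · simp at hpre
  rcases ys with _ | ⟨i, ys⟩; · simp at hpre
  exact (pv_core a b c d e f g h i ys matrix hys.symm).symm ▸ rfl
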